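-- pv_equiv track=rewrite | github.com/bclawbot/keywordit-site | keyword_expander.py | _is_branded
-- ===== SOURCE A (Python) =====
-- def _is_branded(text: str) -> bool:
--     """
--     Heuristic: detect branded keywords by checking against a hardcoded list
--     of common brand name patterns. Not exhaustive — catches obvious ones.
--     """
--     BRAND_SIGNALS = (
--         "amazon", "google", "apple", "microsoft", "facebook", "meta",
--         "instagram", "tiktok", "youtube", "twitter", "x.com",
--         "netflix", "spotify", "airbnb", "uber", "lyft", "paypal",
--         "ebay", "walmart", "target", "costco", "ikea", "mcdonalds",
--         "starbucks", "samsung", "sony", "nike", "adidas",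
--     )
--     lower = text.lower()
--     return any(b in lower for b in BRAND_SIGNALS)
-- ===== SOURCE B (Python) =====
-- def _is_branded(text: str) -> bool:
--     """First-letter dispatch: scan positions once; at each position look up the
--     current character in a dict keyed by brand first letters and check only the
--     matching brands' suffixes as prefixes of the rest."""
--     TABLE = {
--         'a': ("mazon", "pple", "irbnb", "didas"),
--         'g': ("oogle",),
--         'm': ("icrosoft", "eta", "cdonalds"),
--         'f': ("acebook",),
--         'i': ("nstagram", "kea"),
--         't': ("iktok", "witter", "arget"),
--         'y': ("outube",),
--         'x': (".com",),
--         'n': ("etflix", "ike"),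
--         's': ("potify", "tarbucks", "amsung", "ony"),
--         'u': ("ber",),
--         'l': ("yft",),
--         'p': ("aypal",),
--         'e': ("bay",),
--         'w': ("almart",),
--         'c': ("ostco",),
--     }
--     lower = text.lower()
--     for i, ch in enumerate(lower):
--         for suf in TABLE.get(ch, ()):
--             if lower.startswith(suf, i + 1):
--                 return True
--     return False
-- ===== Notes on version B (the rewrite author's own statement) =====
-- stated objective: alternative
-- what changed: Replaced A's per-brand independent substring scans with a single position scan using a first-letter dispatch table (dict keyed by brand initials) that checks only the matching brands' suffixes at each offset.
import Mathlib
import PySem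

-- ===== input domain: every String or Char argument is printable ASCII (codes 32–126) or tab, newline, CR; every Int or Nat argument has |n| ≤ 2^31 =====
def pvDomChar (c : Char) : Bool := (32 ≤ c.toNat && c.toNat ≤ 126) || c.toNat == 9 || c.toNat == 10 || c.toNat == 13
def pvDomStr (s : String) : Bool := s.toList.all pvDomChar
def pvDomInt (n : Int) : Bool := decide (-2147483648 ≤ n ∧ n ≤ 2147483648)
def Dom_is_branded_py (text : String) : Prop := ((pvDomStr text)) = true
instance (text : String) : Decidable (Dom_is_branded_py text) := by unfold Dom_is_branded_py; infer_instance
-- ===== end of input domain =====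

-- B replaces A's per-brand substring scans with one position scan dispatching on the
-- first letter through a table of (initial, suffixes); alternative decomposition, same result.


-- ===== PORT A =====
def brandSignals : List String :=
  ["amazon", "google", "apple", "microsoft", "facebook", "meta",
   "instagram", "tiktok", "youtube", "twitter", "x.com",
   "netflix", "spotify", "airbnb", "uber", "lyft", "paypal",
   "ebay", "walmart", "target", "costco", "ikea", "mcdonalds",
   "starbucks", "samsung", "sony", "nike", "adidas"]

-- any(b in lower for b in BRAND_SIGNALS)
def is_branded_py (text : String) : Bool :=
  let lower := PySem.Str.lower text
  brandSignals.any (fun b => PySem.Str.isIn b lower)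

-- ===== PORT B =====
-- TABLE = {'a': ("mazon", ...), ...}: first letter ↦ suffixes of the brands starting with it
def brandTable : List (Char × List String) :=
  [('a', ["mazon", "pple", "irbnb", "didas"]),
   ('g', ["oogle"]),
   ('m', ["icrosoft", "eta", "cdonalds"]),
   ('f', ["acebook"]),
   ('i', ["nstagram", "kea"]),
   ('t', ["iktok", "witter", "arget"]),
   ('y', ["outube"]),
   ('x', [".com"]),
   ('n', ["etflix", "ike"]),
   ('s', ["potify", "tarbucks", "amsung", "ony"]),
   ('u', ["ber"]),
   ('l', ["yft"]),
   ('p', ["aypal"]),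
   ('e', ["bay"]),
   ('w', ["almart"]),
   ('c', ["ostco"])]

-- for i, ch in enumerate(lower): for suf in TABLE.get(ch, ()): if lower.startswith(suf, i+1): return True
-- (the enumerate scan walks the suffixes structurally; TABLE.get(ch) dispatch is the kv.1 == c test;
--  lower.startswith(suf, i+1) is suf.isPrefixOf applied to the rest after position i)
def altDispatch (c : Char) (rest : List Char) : Bool :=
  brandTable.any (fun kv => kv.1 == c && kv.2.any (fun suf => suf.toList.isPrefixOf rest))

def altScan : List Char → Bool
  | [] => false
  | c :: rest => altDispatch c rest || altScan rest

def is_branded_py_alt (text : String) : Bool :=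
  altScan (PySem.Str.lower text).toList

-- ===== PRECONDITION & SPEC =====
def Spec_is_branded_py (text : String) (out : Bool) : Prop := out = is_branded_py_alt text
instance (text : String) (out : Bool) : Decidable (Spec_is_branded_py text out) := by unfold Spec_is_branded_py; infer_instance

-- ===== CLAIM =====
def Claim_equal_is_branded_py : Prop := ∀ (text : String), Dom_is_branded_py text → Spec_is_branded_py text (is_branded_py text)

-- ===== LEMMAS AND PROOFS =====

-- the table flattened back into full brand words (used only by the proofs)
def tableBrands : List (List Char) :=
  brandTable.flatMap (fun kv => kv.2.map (fun suf => kv.1 :: suf.toList))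

-- dispatch at a position = "some flattened brand is a prefix here"
theorem altDispatch_eq (c : Char) (rest : List Char) :
    tableBrands.any (fun b => b.isPrefixOf (c :: rest)) = altDispatch c rest := by
  unfold tableBrands altDispatch
  induction brandTable with
  | nil => rfl
  | cons kv t ih =>
    obtain ⟨k, sufs⟩ := kv
    simp only [List.flatMap_cons, List.any_append, List.any_cons, ih, List.any_map,
      Function.comp_def, List.isPrefixOf]
    congr 1
    induction sufs with
    | nil => simp
    | cons s ss ihs =>
      simp only [List.any_cons, ihs, Bool.and_or_distrib_left]

-- the flattened table is a permutation of A's brand list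
theorem tableBrands_perm : tableBrands.Perm (brandSignals.map String.toList) := by
  decide

-- the position scan computes "some brand is an infix"
theorem altScan_eq (cs : List Char) :
    (brandSignals.map String.toList).any (fun b => PySem.Chars.isIn b cs) = altScan cs := by
  induction cs with
  | nil =>
    simp only [altScan]
    rw [Bool.eq_false_iff]
    intro h
    rcases List.any_eq_true.mp h with ⟨b, hb, hin⟩
    have hinf := (PySem.Chars.isIn_iff_infix _ _).mp hin
    have hne : b ≠ [] := by
      rcases List.mem_map.mp hb with ⟨s, hs, rfl⟩
      fin_cases hs <;> decide
    exact hne (List.infix_nil.mp hinf)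
  | cons c rest ih =>
    simp only [altScan, ← ih, ← altDispatch_eq, ← tableBrands_perm.any_eq]
    rw [Bool.eq_iff_iff]
    simp only [Bool.or_eq_true, List.any_eq_true, PySem.Chars.isIn_iff_infix,
      List.infix_cons_iff, List.isPrefixOf_iff_prefix]
    constructor
    · rintro ⟨x, hx, h | h⟩
      · exact Or.inl ⟨x, hx, h⟩
      · exact Or.inr ⟨x, hx, h⟩
    · rintro (⟨x, hx, h⟩ | ⟨x, hx, h⟩)
      · exact ⟨x, hx, Or.inl h⟩
      · exact ⟨x, hx, Or.inr h⟩

-- ===== VERDICT =====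
theorem is_branded_py_spec : Claim_equal_is_branded_py := by
  intro text _
  unfold Spec_is_branded_py is_branded_py is_branded_py_alt
  rw [← altScan_eq]
  simp only [List.any_map, PySem.Str.isIn_eq]
  rfl
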